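-- pv_equiv track=rewrite | github.com/stefantaubert/textgrid-ipa | src/textgrid_tools/intervals/symbols_joining.py | merge_together
-- ===== SOURCE A (Python) =====
-- from typing import Generator, List, Optional, Set, Tuple, cast
--
-- def merge_together(symbols: Tuple[str, ...], join: Set[str]) -> List[Tuple[str, ...]]:
--   current_chunk = []
--   for symbol in symbols:
--     if symbol in join:
--       current_chunk.append(symbol)
--     else:
--       if len(current_chunk) > 0:
--         yield current_chunk
--         current_chunk = []
--       yield [symbol]
--
--   if len(current_chunk) > 0:
--     yield current_chunk
-- ===== SOURCE B (Python) =====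
-- from itertools import groupby
--
-- def merge_together(symbols, join):
--   for key, group in groupby(symbols, key=lambda s: s in join):
--     if key:
--       yield list(group)
--     else:
--       for s in group:
--         yield [s]
-- ===== Notes on version B (the rewrite author's own statement) =====
-- stated objective: idiomatic
-- what changed: Replaces the manual current_chunk accumulator with flush-on-boundary logic by itertools.groupby runs keyed on membership in join, emitting each True-run as one chunk and expanding False-runs into singletons.
import Mathlib
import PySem

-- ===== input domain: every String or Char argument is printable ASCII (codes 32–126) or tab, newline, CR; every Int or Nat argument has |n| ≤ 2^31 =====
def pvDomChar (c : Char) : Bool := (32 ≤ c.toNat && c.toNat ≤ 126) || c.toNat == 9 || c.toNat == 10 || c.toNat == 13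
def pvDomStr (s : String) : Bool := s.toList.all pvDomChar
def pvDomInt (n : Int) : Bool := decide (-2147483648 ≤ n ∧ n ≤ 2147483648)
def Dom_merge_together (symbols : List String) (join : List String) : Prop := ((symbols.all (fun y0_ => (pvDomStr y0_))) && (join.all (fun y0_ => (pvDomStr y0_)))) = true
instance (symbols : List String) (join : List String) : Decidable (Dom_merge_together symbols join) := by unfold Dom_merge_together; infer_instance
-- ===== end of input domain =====

-- B replaces A's manual current_chunk accumulator with a groupby over membership runs
-- (True-run -> one chunk, False-run -> singletons); more idiomatic, same O(n) cost.


-- ===== PORT A =====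
-- A's loop over symbols carrying current_chunk, flushing it on a non-join symbol
-- and once more after the loop.
def mtLoopA (join : List String) : List String → List String → List (List String)
  | cur, [] => if cur.length > 0 then [cur] else []
  | cur, s :: rest =>
    if join.contains s then
      mtLoopA join (cur ++ [s]) rest
    else
      (if cur.length > 0 then [cur] else []) ++ [s] :: mtLoopA join [] rest

def merge_together (symbols : List String) (join : List String) : List (List String) :=
  mtLoopA join [] symbols

-- ===== PORT B =====
-- itertools.groupby with key = (s in join): maximal runs of equal key,
-- transliterated as a right-fold grouping of adjacent equal keys.
def mtRuns (key : String → Bool) : List String → List (Bool × List String)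
  | [] => []
  | s :: rest =>
    match mtRuns key rest with
    | [] => [(key s, [s])]
    | (k, g) :: gs =>
      if k == key s then (k, s :: g) :: gs else (key s, [s]) :: (k, g) :: gs

def merge_together_alt (symbols : List String) (join : List String) : List (List String) :=
  (mtRuns (fun s => join.contains s) symbols).flatMap
    (fun kg => if kg.1 then [kg.2] else kg.2.map (fun x => [x]))

-- ===== PRECONDITION & SPEC =====
def Spec_merge_together (symbols : List String) (join : List String) (out : List (List String)) : Prop := out = merge_together_alt symbols join
instance (symbols : List String) (join : List String) (out : List (List String)) : Decidable (Spec_merge_together symbols join out) := by unfold Spec_merge_together; infer_instance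

-- ===== CLAIM (what is proved, stated in full; the proofs are below) =====
def Claim_equal_merge_together : Prop := ∀ (symbols : List String) (join : List String), Dom_merge_together symbols join → Spec_merge_together symbols join (merge_together symbols join)

-- ===== LEMMAS AND PROOFS =====

-- flatten the run list into B's output
def mtFlat (gs : List (Bool × List String)) : List (List String) :=
  gs.flatMap (fun kg => if kg.1 then [kg.2] else kg.2.map (fun x => [x]))

-- A's pending chunk cur merged in front of the flattened runs: if the first run
-- is a join-run, cur is absorbed into it; otherwise cur (if nonempty) is emitted first.
def mtCombine (cur : List String) (gs : List (Bool × List String)) : List (List String) :=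
  match gs with
  | (true, g) :: rest => (cur ++ g) :: mtFlat rest
  | _ => (if cur.length > 0 then [cur] else []) ++ mtFlat gs

theorem mtLoopA_eq_combine (join : List String) (l : List String) :
    ∀ cur, mtLoopA join cur l = mtCombine cur (mtRuns (fun s => join.contains s) l) := by
  induction l with
  | nil => intro cur; simp [mtLoopA, mtRuns, mtCombine, mtFlat]
  | cons s rest ih =>
    intro cur
    by_cases hm : s ∈ join
    · have hk : join.contains s = true := by simpa using hm
      simp only [mtLoopA, hk, if_true, ih]
      simp only [mtRuns]
      cases hr : mtRuns (fun s => join.contains s) rest with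
      | nil => simp [hm, mtCombine, mtFlat]
      | cons p gs =>
        obtain ⟨k, g⟩ := p
        cases k with
        | true => simp [hm, mtCombine]
        | false => simp [hm, mtCombine, mtFlat]
    · have hk : join.contains s = false := by simpa using hm
      simp only [mtLoopA, hk, Bool.false_eq_true, if_false, ih]
      simp only [mtRuns]
      cases hr : mtRuns (fun s => join.contains s) rest with
      | nil => simp [hm, mtCombine, mtFlat]
      | cons p gs =>
        obtain ⟨k, g⟩ := p
        cases k with
        | true => simp [hm, mtCombine, mtFlat]
        | false => simp [hm, mtCombine, mtFlat]

-- ===== VERDICT (by name: the statement is the Claim_ definition above) =====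
theorem merge_together_spec : Claim_equal_merge_together := by
  intro symbols join _
  unfold Spec_merge_together merge_together merge_together_alt
  rw [mtLoopA_eq_combine]
  cases h : mtRuns (fun s => join.contains s) symbols with
  | nil => simp [mtCombine, mtFlat]
  | cons p gs =>
    obtain ⟨k, g⟩ := p
    cases k with
    | true => simp [mtCombine, mtFlat]
    | false => simp [mtCombine, mtFlat]
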